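-- pv_equiv track=rewrite | github.com/feiyangliu2023/JobSpyFeiyang | monitor/render_md.py | _dedupe_by_signature
-- ===== SOURCE A (Python) =====
-- _DIRECT_PREFIX = "direct:"
--
-- _SOURCE_PRIORITY = [
--     "simplify_newgrad",
--     "simplify_intern",
--     "vanshb03_summer2026",
--     # speedyapply renders FROM SimplifyJobs, so ranking it below means the
--     # raw upstream wins the dedup tie; speedyapply rows survive only when
--     # they represent postings the canonical feed hasn't picked up yet.
--     "speedyapply_newgrad_usa",
--     "speedyapply_intern_usa",
--     "speedyapply_newgrad_intl",
--     "speedyapply_intern_intl",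
--     "simplify",       # legacy label, kept for old DB rows
--     "linkedin",
--     "indeed",
--     "glassdoor",
--     "google",
-- ]
--
-- def _source_rank(site: str | None) -> int:
--     if not site:
--         return len(_SOURCE_PRIORITY) + 2
--     s = site.lower()
--     # `direct:*` always wins — promoted ABOVE everything in _SOURCE_PRIORITY
--     # by returning -1. The bare prefix with nothing after it gets ranked
--     # at the end (treat as unknown) so a malformed label doesn't sneak past.
--     if s.startswith(_DIRECT_PREFIX) and len(s) > len(_DIRECT_PREFIX):
--         return -1
--     for i, name in enumerate(_SOURCE_PRIORITY):
--         if s == name: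
--             return i
--     return len(_SOURCE_PRIORITY) + 1
--
-- def _dedupe_by_signature(rows: list[dict]) -> tuple[list[dict], int]:
--     """Collapse rows that share a signature, keep the higher-priority source.
--
--     Callers pass per-region row lists — we never collapse across regions,
--     since "Apple, Cupertino" and "Apple, London" are obviously different
--     roles even with similar titles.
--
--     Returns (deduped_rows, num_collapsed).
--     """
--     by_sig: dict[str, dict] = {}
--     no_sig: list[dict] = []
--     collapsed = 0
--     for r in rows:
--         sig = (r.get("signature") or "").strip()
--         if not sig:
--             no_sig.append(r)
--             continue
--         prev = by_sig.get(sig)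
--         if prev is None:
--             by_sig[sig] = r
--             continue
--         # Already have one with this signature — keep the higher-priority
--         # source. Tie-breaker: keep whichever was scraped first
--         # (lower first_seen) so the row that's been around longer wins
--         # over a freshly-discovered duplicate.
--         prev_rank = _source_rank(prev.get("site"))
--         curr_rank = _source_rank(r.get("site"))
--         if curr_rank < prev_rank or (
--             curr_rank == prev_rank
--             and (r.get("first_seen") or "") < (prev.get("first_seen") or "")
--         ):
--             by_sig[sig] = r
--         collapsed += 1
--     return list(by_sig.values()) + no_sig, collapsed
-- ===== SOURCE B (Python) =====
-- _DIRECT_PREFIX = "direct:"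
--
-- _SOURCE_PRIORITY = [
--     "simplify_newgrad",
--     "simplify_intern",
--     "vanshb03_summer2026",
--     "speedyapply_newgrad_usa",
--     "speedyapply_intern_usa",
--     "speedyapply_newgrad_intl",
--     "speedyapply_intern_intl",
--     "simplify",
--     "linkedin",
--     "indeed",
--     "glassdoor",
--     "google",
-- ]
--
-- def _source_rank(site):
--     if not site:
--         return len(_SOURCE_PRIORITY) + 2
--     s = site.lower()
--     if s.startswith(_DIRECT_PREFIX) and len(s) > len(_DIRECT_PREFIX):
--         return -1
--     for i, name in enumerate(_SOURCE_PRIORITY):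
--         if s == name:
--             return i
--     return len(_SOURCE_PRIORITY) + 1
--
-- def _row_key(r):
--     return (_source_rank(r.get("site")), r.get("first_seen") or "")
--
-- def _dedupe_by_signature(rows):
--     """Group rows by signature, then pick each group's best row by (rank, first_seen)."""
--     groups = {}
--     no_sig = []
--     for r in rows:
--         sig = (r.get("signature") or "").strip()
--         if sig:
--             groups.setdefault(sig, []).append(r)
--         else:
--             no_sig.append(r)
--     collapsed = sum(len(g) - 1 for g in groups.values())
--     winners = [min(g, key=_row_key) for g in groups.values()]
--     return winners + no_sig, collapsed
-- ===== Notes on version B (the rewrite author's own statement) =====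
-- stated objective: alternative
-- what changed: Replaces A's single-pass inline running-minimum dict update and incremental collapsed counter with a staged decomposition: one pass groups rows into per-signature lists, then collapsed is computed as sum(len(g)-1) and each group's winner is selected with min(g, key=(rank, first_seen)).
import Mathlib
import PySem

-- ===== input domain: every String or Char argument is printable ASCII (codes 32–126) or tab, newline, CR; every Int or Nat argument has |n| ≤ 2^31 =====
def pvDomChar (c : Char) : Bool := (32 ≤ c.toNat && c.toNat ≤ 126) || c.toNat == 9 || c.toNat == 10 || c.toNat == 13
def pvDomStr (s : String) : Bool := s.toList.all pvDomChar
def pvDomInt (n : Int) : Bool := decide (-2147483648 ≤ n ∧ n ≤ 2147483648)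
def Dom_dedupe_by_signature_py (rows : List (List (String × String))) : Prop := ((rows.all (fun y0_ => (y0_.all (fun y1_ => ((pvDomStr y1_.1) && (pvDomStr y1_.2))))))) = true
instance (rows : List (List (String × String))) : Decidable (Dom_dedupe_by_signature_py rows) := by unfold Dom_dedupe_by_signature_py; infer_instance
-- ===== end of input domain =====

-- B restructures A's single-pass running-minimum dedup into group-by-signature
-- followed by per-group minimum selection; objective: alternative decomposition, same cost.

-- ===== PORT A =====
-- a Python row (a dict str -> str) as an association list
abbrev PRow : Type := List (String × String)

-- module constant _SOURCE_PRIORITY (shared by both Pythons)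
def sourcePriority : List String :=
  ["simplify_newgrad", "simplify_intern", "vanshb03_summer2026",
   "speedyapply_newgrad_usa", "speedyapply_intern_usa",
   "speedyapply_newgrad_intl", "speedyapply_intern_intl",
   "simplify", "linkedin", "indeed", "glassdoor", "google"]

-- r.get(k) on a row dict
def rget (r : PRow) (k : String) : Option String := (PySem.Dict.mk r).get? k

-- the 'for i, name in enumerate(_SOURCE_PRIORITY): if s == name: return i' loop,
-- falling through to len(_SOURCE_PRIORITY) + 1
def rankScan (s : String) : List (Int × String) → Int
  | [] => (sourcePriority.length : Int) + 1
  | (i, name) :: rest => if s = name then i else rankScan s rest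

-- _source_rank (shared module helper of both Pythons); 'not site' is None or ""
def source_rank_py (site : Option String) : Int :=
  match site with
  | none => (sourcePriority.length : Int) + 2
  | some st =>
    if st = "" then (sourcePriority.length : Int) + 2
    else
      let s := PySem.Str.lower st
      if PySem.Str.startswith s "direct:" && decide (PySem.Str.len "direct:" < PySem.Str.len s)
      then (-1 : Int)
      else rankScan s (PySem.List.enumerate sourcePriority)

-- sig = (r.get("signature") or "").strip()   ('or ""' maps None and "" both to "")
def sigOf (r : PRow) : String := PySem.Str.strip ((rget r "signature").getD "")

-- r.get("first_seen") or ""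
def fsOf (r : PRow) : String := (rget r "first_seen").getD ""

-- one iteration of A's loop over (by_sig, no_sig, collapsed)
def dedupeStepA (st : PySem.Dict String PRow × List PRow × Int) (r : PRow) :
    PySem.Dict String PRow × List PRow × Int :=
  let (bySig, noSig, collapsed) := st
  let sig := sigOf r
  if sig = "" then (bySig, noSig ++ [r], collapsed)
  else
    match bySig.get? sig with
    | none => (bySig.insert sig r, noSig, collapsed)
    | some prev =>
      let prevRank := source_rank_py (rget prev "site")
      let currRank := source_rank_py (rget r "site")
      let bySig' :=
        if currRank < prevRank ∨ (currRank = prevRank ∧ fsOf r < fsOf prev)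
        then bySig.insert sig r else bySig
      (bySig', noSig, collapsed + 1)

def dedupe_by_signature_py (rows : List (List (String × String))) : (List (List (String × String))) × Int :=
  let (bySig, noSig, collapsed) := rows.foldl dedupeStepA (PySem.Dict.empty, [], 0)
  (bySig.values ++ noSig, collapsed)

-- ===== PORT B =====
-- _row_key(r) = (_source_rank(r.get("site")), r.get("first_seen") or "")
def rowKey (r : PRow) : Int × String := (source_rank_py (rget r "site"), fsOf r)

-- the tuple comparison _row_key(r) < _row_key(best)
def keyLess (r best : PRow) : Bool :=
  decide ((rowKey r).1 < (rowKey best).1 ∨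
          ((rowKey r).1 = (rowKey best).1 ∧ (rowKey r).2 < (rowKey best).2))

-- min(g, key=_row_key): first element wins ties ([] unreachable: groups are nonempty)
def groupMin (g : List PRow) : PRow :=
  match g with
  | [] => []
  | h :: t => t.foldl (fun best r => if keyLess r best then r else best) h

-- grouping pass: groups.setdefault(sig, []).append(r) keeps the entry in place
def dedupeGroupB (st : PySem.Dict String (List PRow) × List PRow) (r : PRow) :
    PySem.Dict String (List PRow) × List PRow :=
  let (groups, noSig) := st
  let sig := sigOf r
  if sig = "" then (groups, noSig ++ [r])
  else (groups.insert sig (groups.getD sig [] ++ [r]), noSig)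

def dedupe_by_signature_py_alt (rows : List (List (String × String))) : (List (List (String × String))) × Int :=
  let (groups, noSig) := rows.foldl dedupeGroupB (PySem.Dict.empty, [])
  let collapsed : Int := (groups.values.map (fun g => (g.length : Int) - 1)).sum
  let winners := groups.values.map groupMin
  (winners ++ noSig, collapsed)

-- ===== PRECONDITION & SPEC =====
def Spec_dedupe_by_signature_py (rows : List (List (String × String))) (out : (List (List (String × String))) × Int) : Prop := out = dedupe_by_signature_py_alt rows
instance (rows : List (List (String × String))) (out : (List (List (String × String))) × Int) : Decidable (Spec_dedupe_by_signature_py rows out) := by unfold Spec_dedupe_by_signature_py; infer_instance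

-- ===== CLAIM (what is proved, stated in full; the proofs are below) =====
def Claim_equal_dedupe_by_signature_py : Prop := ∀ (rows : List (List (String × String))), Dom_dedupe_by_signature_py rows → Spec_dedupe_by_signature_py rows (dedupe_by_signature_py rows)

-- ===== LEMMAS AND PROOFS =====

-- A's dict of winners, recovered from B's dict of groups
def mapd (g : PySem.Dict String (List PRow)) : PySem.Dict String PRow :=
  PySem.Dict.mk (g.items.map (fun p => (p.1, groupMin p.2)))

-- B's collapsed count of a group dict
def colOf (g : PySem.Dict String (List PRow)) : Int :=
  (g.values.map (fun l => (l.length : Int) - 1)).sum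

theorem mapd_get? (g : PySem.Dict String (List PRow)) (k : String) :
    (mapd g).get? k = (g.get? k).map groupMin := by
  cases g with
  | mk items =>
    induction items with
    | nil => rfl
    | cons p rest ih =>
      simp only [mapd, PySem.Dict.get?, List.map_cons, List.find?_cons] at *
      by_cases h : p.1 == k
      · simp [h]
      · simp only [h] at *
        simpa using ih

theorem mapd_keys (g : PySem.Dict String (List PRow)) : (mapd g).keys = g.keys := by
  simp [mapd, PySem.Dict.keys, List.map_map, Function.comp_def]

theorem mapd_empty : mapd PySem.Dict.empty = PySem.Dict.empty := rfl

theorem colOf_empty : colOf PySem.Dict.empty = 0 := rfl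

theorem mapd_insert (g : PySem.Dict String (List PRow)) (k : String) (l : List PRow) :
    mapd (g.insert k l) = (mapd g).insert k (groupMin l) := by
  cases g with
  | mk items =>
    simp only [mapd, PySem.Dict.insert, PySem.Dict.contains, List.any_map, Function.comp_def]
    by_cases hc : (items.any (fun p => p.1 == k)) = true
    · simp only [hc, if_true]
      congr 1
      simp only [List.map_map]
      apply List.map_congr_left
      intro p _
      by_cases hp : p.1 = k
      · simp [hp]
      · simp [hp]
    · simp [hc]

theorem groupMin_singleton (r : PRow) : groupMin [r] = r := rfl

theorem groupMin_append (l : List PRow) (r : PRow) (h : l ≠ []) :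
    groupMin (l ++ [r]) = if keyLess r (groupMin l) then r else groupMin l := by
  cases l with
  | nil => exact absurd rfl h
  | cons h t => simp [groupMin, List.foldl_append]

-- replacing the (unique) entry at key k by itself is the identity
theorem map_repl_self {β : Type} (items : List (String × β)) (k : String) (v0 : β)
    (hnd : (items.map Prod.fst).Nodup) (hmem : (k, v0) ∈ items) :
    items.map (fun p => if p.1 == k then (k, v0) else p) = items := by
  induction items with
  | nil => cases hmem
  | cons p rest ih =>
    simp only [List.map_cons, List.nodup_cons] at hnd
    rcases List.mem_cons.mp hmem with hp | hp
    · subst hp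
      simp only [beq_self_eq_true, if_true, List.map_cons, List.cons.injEq, true_and]
      have hq : ∀ q ∈ rest, (fun p : String × β => if p.1 == k then (k, v0) else p) q = q := by
        intro q hq
        have hqk : q.1 ≠ k := by
          intro he
          have hm : q.1 ∈ rest.map Prod.fst := List.mem_map_of_mem (f := Prod.fst) hq
          rw [he] at hm
          exact hnd.1 hm
        simp [hqk]
      rw [List.map_congr_left hq]
      simp
    · have hk : k ∈ rest.map Prod.fst := by
        simpa using List.mem_map_of_mem (f := Prod.fst) hp
      have hne : ¬ ((p.1 == k) = true) := by
        intro h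
        exact hnd.1 ((eq_of_beq h) ▸ hk)
      simp only [List.map_cons, hne, Bool.false_eq_true, ite_false]
      exact congrArg _ (ih hnd.2 hp)

-- weighted sum over the replacement of the (unique) entry at key k
theorem sum_map_repl {β : Type} (w : β → Int) (items : List (String × β)) (k : String)
    (v0 v : β) (hnd : (items.map Prod.fst).Nodup) (hmem : (k, v0) ∈ items) :
    ((items.map (fun p => if p.1 == k then (k, v) else p)).map (fun p => w p.2)).sum
      = (items.map (fun p => w p.2)).sum + w v - w v0 := by
  induction items with
  | nil => cases hmem
  | cons p rest ih =>
    simp only [List.map_cons, List.nodup_cons] at hnd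
    rcases List.mem_cons.mp hmem with hp | hp
    · subst hp
      simp only [beq_self_eq_true, if_true, List.map_cons, List.sum_cons]
      have hq : ∀ q ∈ rest, (fun p : String × β => if p.1 == k then (k, v) else p) q = q := by
        intro q hq
        have hqk : q.1 ≠ k := by
          intro he
          have hm : q.1 ∈ rest.map Prod.fst := List.mem_map_of_mem (f := Prod.fst) hq
          rw [he] at hm
          exact hnd.1 hm
        simp [hqk]
      rw [List.map_congr_left hq]
      simp only [List.map_id']
      ring
    · have hk : k ∈ rest.map Prod.fst := by
        simpa using List.mem_map_of_mem (f := Prod.fst) hp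
      have hne : ¬ ((p.1 == k) = true) := by
        intro h
        exact hnd.1 ((eq_of_beq h) ▸ hk)
      simp only [List.map_cons, hne, Bool.false_eq_true, ite_false, List.sum_cons]
      rw [ih hnd.2 hp]
      ring

theorem insert_self_of_get? (d : PySem.Dict String PRow) (k : String) (v : PRow)
    (hnd : d.keys.Nodup) (h : d.get? k = some v) : d.insert k v = d := by
  have hc : d.contains k = true := by
    rw [PySem.Dict.contains_eq_isSome_get?, h]; rfl
  have hmem : (k, v) ∈ d.items := PySem.Dict.mem_items_of_get?_eq_some _ h
  apply PySem.Dict.ext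
  simp only [PySem.Dict.insert, hc, if_true]
  exact map_repl_self d.items k v (by simpa [PySem.Dict.keys] using hnd) hmem

theorem colOf_insert_new (g : PySem.Dict String (List PRow)) (k : String) (l : List PRow)
    (h : g.contains k = false) :
    colOf (g.insert k l) = colOf g + ((l.length : Int) - 1) := by
  simp [colOf, PySem.Dict.insert, h, PySem.Dict.values]

theorem colOf_insert_existing (g : PySem.Dict String (List PRow)) (k : String)
    (l0 l : List PRow) (hnd : g.keys.Nodup) (h : g.get? k = some l0) :
    colOf (g.insert k l) = colOf g + (l.length : Int) - (l0.length : Int) := by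
  have hc : g.contains k = true := by
    rw [PySem.Dict.contains_eq_isSome_get?, h]; rfl
  have hmem : (k, l0) ∈ g.items := PySem.Dict.mem_items_of_get?_eq_some _ h
  simp only [PySem.Dict.keys] at hnd
  simp only [colOf, PySem.Dict.insert, hc, if_true, PySem.Dict.values, List.map_map,
    Function.comp_def]
  have := sum_map_repl (fun l => (l.length : Int) - 1) g.items k l0 l hnd hmem
  simp only [List.map_map, Function.comp_def] at this
  rw [this]
  ring

theorem stepAB (g : PySem.Dict String (List PRow)) (ns : List PRow) (c : Int) (r : PRow)
    (hnd : g.keys.Nodup) (hne : ∀ p ∈ g.items, p.2 ≠ []) :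
    dedupeStepA (mapd g, ns, c) r =
      (mapd (dedupeGroupB (g, ns) r).1, (dedupeGroupB (g, ns) r).2,
       c + colOf (dedupeGroupB (g, ns) r).1 - colOf g) := by
  by_cases hsig : sigOf r = ""
  · simp [dedupeStepA, dedupeGroupB, hsig]
  · cases hget : g.get? (sigOf r) with
    | none =>
      have hcontains : g.contains (sigOf r) = false := by
        rw [PySem.Dict.contains_eq_isSome_get?, hget]; rfl
      have hgd : g.getD (sigOf r) [] = [] := by simp [PySem.Dict.getD, hget]
      simp only [dedupeStepA, dedupeGroupB, hsig, mapd_get?, hget, Option.map,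
        hgd, List.nil_append, ite_false]
      rw [mapd_insert, groupMin_singleton, colOf_insert_new g _ _ hcontains]
      simp
    | some l =>
      have hlne : l ≠ [] := hne _ (PySem.Dict.mem_items_of_get?_eq_some _ hget)
      have hgd : g.getD (sigOf r) [] = l := by simp [PySem.Dict.getD, hget]
      simp only [dedupeStepA, dedupeGroupB, hsig, mapd_get?, hget, Option.map,
        hgd, ite_false]
      rw [mapd_insert, groupMin_append l r hlne,
        colOf_insert_existing g _ l (l ++ [r]) hnd hget]
      have harith : c + (colOf g + ((l ++ [r]).length : Int) - (l.length : Int)) - colOf g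
          = c + 1 := by
        simp only [List.length_append, List.length_cons, List.length_nil]
        push_cast
        ring
      rw [harith]
      by_cases hc : source_rank_py (rget r "site") < source_rank_py (rget (groupMin l) "site") ∨
          (source_rank_py (rget r "site") = source_rank_py (rget (groupMin l) "site") ∧
           fsOf r < fsOf (groupMin l))
      · have hk : keyLess r (groupMin l) = true := by
          simp only [keyLess, rowKey, decide_eq_true_eq]
          exact hc
        rw [if_pos hc, hk]
        simp
      · have hk : keyLess r (groupMin l) = false := by
          simp only [keyLess, rowKey, decide_eq_false_iff_not]
          exact hc
        have hmg : (mapd g).get? (sigOf r) = some (groupMin l) := by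
          rw [mapd_get?, hget]; rfl
        have hid : (mapd g).insert (sigOf r) (groupMin l) = mapd g :=
          insert_self_of_get? (mapd g) (sigOf r) (groupMin l) (mapd_keys g ▸ hnd) hmg
        rw [if_neg hc, hk]
        simp [hid]

theorem groupB_preserves (g : PySem.Dict String (List PRow)) (ns : List PRow) (r : PRow)
    (hnd : g.keys.Nodup) (hne : ∀ p ∈ g.items, p.2 ≠ []) :
    (dedupeGroupB (g, ns) r).1.keys.Nodup ∧
      ∀ p ∈ (dedupeGroupB (g, ns) r).1.items, p.2 ≠ [] := by
  by_cases hsig : sigOf r = ""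
  · have hB : dedupeGroupB (g, ns) r = (g, ns ++ [r]) := by simp [dedupeGroupB, hsig]
    rw [hB]
    exact ⟨hnd, hne⟩
  · have hB : dedupeGroupB (g, ns) r
        = (g.insert (sigOf r) (g.getD (sigOf r) [] ++ [r]), ns) := by
      simp [dedupeGroupB, hsig]
    rw [hB]
    constructor
    · apply PySem.Dict.nodup_keys_insert
      exact hnd
    · intro p hp
      rcases (PySem.Dict.mem_items_insert _ _ _ _).mp hp with hp | hp
      · subst hp; simp
      · exact hne _ hp.1

theorem foldAB (rows : List PRow) :
    ∀ (g : PySem.Dict String (List PRow)) (ns : List PRow) (c : Int),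
      g.keys.Nodup → (∀ p ∈ g.items, p.2 ≠ []) →
      rows.foldl dedupeStepA (mapd g, ns, c) =
        (mapd (rows.foldl dedupeGroupB (g, ns)).1,
         (rows.foldl dedupeGroupB (g, ns)).2,
         c + colOf (rows.foldl dedupeGroupB (g, ns)).1 - colOf g) := by
  induction rows with
  | nil => intro g ns c _ _; simp
  | cons r rows ih =>
    intro g ns c hnd hne
    obtain ⟨hnd', hne'⟩ := groupB_preserves g ns r hnd hne
    have hstep := stepAB g ns c r hnd hne
    rcases hgb : dedupeGroupB (g, ns) r with ⟨g1, ns1⟩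
    rw [hgb] at hstep hnd' hne'
    simp only [List.foldl_cons, hstep, hgb]
    rw [ih g1 ns1 _ hnd' hne']
    simp only [Prod.mk.injEq, true_and]
    ring

-- ===== VERDICT (by name: the statement is the Claim_ definition above) =====
theorem dedupe_by_signature_py_spec : Claim_equal_dedupe_by_signature_py := by
  intro rows _
  unfold Spec_dedupe_by_signature_py
  show dedupe_by_signature_py rows = dedupe_by_signature_py_alt rows
  unfold dedupe_by_signature_py dedupe_by_signature_py_alt
  have h := foldAB rows PySem.Dict.empty [] 0 (by simp [PySem.Dict.keys, PySem.Dict.empty])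
    (by simp [PySem.Dict.empty])
  rw [mapd_empty] at h
  rcases hF : rows.foldl dedupeGroupB (PySem.Dict.empty, []) with ⟨G, NS⟩
  rw [hF] at h
  rw [colOf_empty] at h
  simp only [zero_add, sub_zero] at h
  rw [h]
  show ((mapd G).values ++ NS, colOf G)
      = (G.values.map groupMin ++ NS, (G.values.map (fun g => (g.length : Int) - 1)).sum)
  simp only [Prod.mk.injEq]
  constructor
  · simp [mapd, PySem.Dict.values, List.map_map, Function.comp_def]
  · rfl
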